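-- pv_equiv track=rewrite | github.com/pywen/scientific-collabration | Author_Citation/Author_Citation.py | edge_weight
-- ===== SOURCE A (Python) =====
-- def edge_weight(edge):
--   """compute the weight of all edges"""
--   newedgedir={}
--   for i in edge:
--     if i not in newedgedir:
--     	newedgedir[i]=1
--     else:
--         newedgedir[i]+=1
--   newedge=[(i[0],i[1],newedgedir[i]) for i in newedgedir.keys()]
--   return newedge
-- ===== SOURCE B (Python) =====
-- def edge_weight(edge):
--   """compute the weight of all edges"""
--   es = list(edge)
--   newedge = []
--   while es:
--     h = es[0]
--     rest = [x for x in es[1:] if x != h]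
--     newedge.append((h[0], h[1], len(es) - len(rest)))
--     es = rest
--   return newedge
-- ===== Notes on version B (the rewrite author's own statement) =====
-- stated objective: alternative
-- what changed: B uses a partition-and-shrink loop: take the head edge, filter out all of its occurrences from the remainder, read its multiplicity off the length difference, and continue on the shrunken list - no dictionary or counter is ever built.
import Mathlib
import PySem

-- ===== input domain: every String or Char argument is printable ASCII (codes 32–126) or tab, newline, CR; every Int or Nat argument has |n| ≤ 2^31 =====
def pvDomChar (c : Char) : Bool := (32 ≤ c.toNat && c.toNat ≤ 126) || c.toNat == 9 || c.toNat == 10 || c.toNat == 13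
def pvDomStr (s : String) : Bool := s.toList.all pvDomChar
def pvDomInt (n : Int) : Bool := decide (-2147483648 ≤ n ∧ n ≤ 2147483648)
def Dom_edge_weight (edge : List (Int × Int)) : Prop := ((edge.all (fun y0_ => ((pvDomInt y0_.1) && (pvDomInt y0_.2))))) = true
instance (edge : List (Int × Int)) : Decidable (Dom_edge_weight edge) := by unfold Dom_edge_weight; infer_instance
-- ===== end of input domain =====

-- B replaces A's count-dictionary pass by a partition-and-shrink loop (filter out the head edge, multiplicity = length difference); alternative decomposition, same return value.


-- ===== PORT A =====
-- builds the count dict (if i not in d: d[i]=1 else d[i]+=1), then lists (k0,k1,d[k]) over keys.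
-- d[i] in the comprehension: every key i of d is in d, so getD i 0 is exact here.
def edge_weight (edge : List (Int × Int)) : List (Int × Int × Int) :=
  let newedgedir : PySem.Dict (Int × Int) Int :=
    edge.foldl
      (fun d i =>
        if d.contains i = false then d.insert i 1
        else d.modify i 0 (· + 1))
      PySem.Dict.empty
  newedgedir.keys.map (fun i => (i.1, i.2, newedgedir.getD i 0))

-- ===== PORT B =====
-- while es: h = es[0]; rest = [x for x in es[1:] if x != h]; emit (h0, h1, len(es) - len(rest)); es = rest
def edge_weight_alt_go : List (Int × Int) → List (Int × Int × Int)
  | [] => []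
  | h :: tail =>
    let rest := tail.filter (fun x => !(x == h))
    (h.1, h.2, ((h :: tail).length : Int) - rest.length) :: edge_weight_alt_go rest
termination_by es => es.length
decreasing_by
  have hf := List.length_filter_le (fun x : {x // x ∈ tail} => !(x.1 == h)) tail.attach
  simp at hf ⊢
  omega

def edge_weight_alt (edge : List (Int × Int)) : List (Int × Int × Int) :=
  edge_weight_alt_go edge

-- ===== PRECONDITION & SPEC =====
def Spec_edge_weight (edge : List (Int × Int)) (out : List (Int × Int × Int)) : Prop := out = edge_weight_alt edge
instance (edge : List (Int × Int)) (out : List (Int × Int × Int)) : Decidable (Spec_edge_weight edge out) := by unfold Spec_edge_weight; infer_instance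

-- ===== CLAIM (what is proved, stated in full; the proofs are below) =====
def Claim_equal_edge_weight : Prop := ∀ (edge : List (Int × Int)), Dom_edge_weight edge → Spec_edge_weight edge (edge_weight edge)

-- ===== LEMMAS AND PROOFS =====

-- A's per-element step is exactly Counter's step (modify with default 0 collapses to insert 1 on a fresh key).
theorem edge_weight_stepA_eq (d : PySem.Dict (Int × Int) Int) (i : Int × Int) :
    (if d.contains i = false then d.insert i 1 else d.modify i 0 (· + 1)) = d.modify i 0 (· + 1) := by
  by_cases h : d.contains i
  · simp [h]
  · simp only [h, if_true]
    simp [PySem.Dict.modify, PySem.Dict.getD, PySem.Dict.get?,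
      List.find?_eq_none.mpr (by
        intro p hp hpk
        exact h (List.any_eq_true.mpr ⟨p, hp, hpk⟩))]

theorem edge_weight_dict_eq_counter (edge : List (Int × Int)) :
    edge.foldl
      (fun d i => if d.contains i = false then d.insert i 1 else d.modify i 0 (· + 1))
      PySem.Dict.empty = PySem.Dict.counter edge := by
  rw [PySem.Dict.counter_eq_foldl]
  have hstep : (fun (d : PySem.Dict (Int × Int) Int) (i : Int × Int) =>
      if d.contains i = false then d.insert i 1 else d.modify i 0 (· + 1)) =
      (fun d i => d.modify i 0 (· + 1)) :=
    funext fun d => funext fun i => edge_weight_stepA_eq d i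
  rw [hstep]

-- an element already in the set is absorbed
theorem edge_weight_add_mem (s : List (Int × Int)) (x h : Int × Int) (hs : h ∈ s) :
    h ∈ PySem.Set.add s x := by
  unfold PySem.Set.add
  split
  · exact hs
  · exact List.mem_append_left _ hs

-- elements equal to a member of the accumulator are absorbed by Set.add
theorem edge_weight_foldl_add_filter (h : Int × Int) (l : List (Int × Int)) (s : List (Int × Int))
    (hs : h ∈ s) :
    l.foldl PySem.Set.add s = (l.filter (fun x => !(x == h))).foldl PySem.Set.add s := by
  induction l generalizing s with
  | nil => rfl
  | cons x rest ih =>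
    by_cases hx : x = h
    · subst hx
      have habs : PySem.Set.add s x = s := by
        unfold PySem.Set.add PySem.Set.contains
        simp [hs]
      rw [List.filter_cons, if_neg (by simp)]
      simp only [List.foldl_cons, habs]
      exact ih s hs
    · rw [List.filter_cons, if_pos (by simp [hx])]
      simp only [List.foldl_cons]
      exact ih (PySem.Set.add s x) (edge_weight_add_mem s x h hs)

-- a head not occurring in l stays in front of the fold
theorem edge_weight_foldl_add_cons (h : Int × Int) (l : List (Int × Int)) (s : List (Int × Int))
    (hl : ∀ x ∈ l, x ≠ h) :
    l.foldl PySem.Set.add (h :: s) = h :: l.foldl PySem.Set.add s := by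
  induction l generalizing s with
  | nil => rfl
  | cons x rest ih =>
    have hxh : x ≠ h := hl x (by simp)
    have hcon : PySem.Set.contains (h :: s) x = PySem.Set.contains s x := by
      simp [PySem.Set.contains, hxh]
    have hstep : PySem.Set.add (h :: s) x = h :: PySem.Set.add s x := by
      unfold PySem.Set.add
      rw [hcon]
      split <;> rfl
    simp only [List.foldl_cons, hstep]
    exact ih (PySem.Set.add s x) (fun y hy => hl y (by simp [hy]))

-- first-occurrence dedup of h :: tail is h followed by dedup of tail without h
theorem edge_weight_ofList_cons (h : Int × Int) (tail : List (Int × Int)) :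
    PySem.Set.ofList (h :: tail) = h :: PySem.Set.ofList (tail.filter (fun x => !(x == h))) := by
  have h1 : PySem.Set.ofList (h :: tail) = tail.foldl PySem.Set.add [h] := by
    rw [PySem.Set.ofList_eq_foldl]
    rfl
  rw [h1, edge_weight_foldl_add_filter h tail [h] (by simp)]
  have h2 : ∀ x ∈ tail.filter (fun x => !(x == h)), x ≠ h := by
    intro x hx
    have := List.of_mem_filter hx
    simpa using this
  rw [show ([h] : List (Int × Int)) = h :: [] from rfl,
    edge_weight_foldl_add_cons h _ [] h2, PySem.Set.ofList_eq_foldl]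

-- occurrences of h and non-h elements partition the list
theorem edge_weight_count_filter_len (h : Int × Int) (tail : List (Int × Int)) :
    tail.count h + (tail.filter (fun x => !(x == h))).length = tail.length := by
  induction tail with
  | nil => rfl
  | cons y t iht =>
    by_cases hy : y = h
    · subst hy
      simp only [List.count_cons_self, List.filter_cons, beq_self_eq_true,
        Bool.not_true, Bool.false_eq_true, if_false, List.length_cons]
      omega
    · have hyh : (y == h) = false := beq_eq_false_iff_ne.mpr hy
      rw [List.filter_cons, if_pos (by simp [hy])]
      simp only [List.count_cons, hyh, Bool.false_eq_true, if_false, List.length_cons]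
      omega

-- B's loop computes the same first-occurrence/count table as the counter view
theorem edge_weight_go_eq_aux (n : Nat) :
    ∀ es : List (Int × Int), es.length ≤ n →
      edge_weight_alt_go es =
        (PySem.Set.ofList es).map (fun i => (i.1, i.2, (es.count i : Int))) := by
  induction n with
  | zero =>
    intro es hes
    have : es = [] := List.eq_nil_of_length_eq_zero (Nat.le_zero.mp hes)
    subst this
    simp [edge_weight_alt_go]
  | succ n ih =>
    intro es hes
    match es with
    | [] => simp [edge_weight_alt_go]
    | h :: tail =>
      rw [edge_weight_alt_go, edge_weight_ofList_cons, List.map_cons]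
      have hle : (tail.filter (fun x => !(x == h))).length ≤ tail.length :=
        List.length_filter_le _ _
      rw [ih (tail.filter (fun x => !(x == h))) (by simp at hes; omega)]
      congr 1
      · -- head entry: length difference = count of h in h :: tail
        have hsplit := edge_weight_count_filter_len h tail
        have hcc : (h :: tail).count h = tail.count h + 1 := by simp
        simp only [List.length_cons, hcc]
        refine congrArg (fun c => (h.1, h.2, c)) ?_
        push_cast
        omega
      · -- remaining entries: counts in the filtered rest agree with counts in h :: tail
        apply List.map_congr_left
        intro x hx
        have hxh : x ≠ h := by
          have hmem : x ∈ tail.filter (fun x => !(x == h)) := (PySem.Set.mem_ofList _ _).mp hx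
          have := List.of_mem_filter hmem
          simpa using this
        have : (tail.filter (fun x => !(x == h))).count x = (h :: tail).count x := by
          rw [List.count_filter (by simp [hxh])]
          simp [Ne.symm hxh]
        rw [this]

theorem edge_weight_go_eq (es : List (Int × Int)) :
    edge_weight_alt_go es =
      (PySem.Set.ofList es).map (fun i => (i.1, i.2, (es.count i : Int))) :=
  edge_weight_go_eq_aux es.length es (le_refl _)

-- ===== VERDICT (by name: the statement is the Claim_ definition above) =====
theorem edge_weight_spec : Claim_equal_edge_weight := by
  intro edge _
  unfold Spec_edge_weight edge_weight edge_weight_alt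
  simp only [edge_weight_dict_eq_counter, edge_weight_go_eq, PySem.Dict.keys_counter]
  apply List.map_congr_left
  intro i _
  simp [PySem.Dict.getD_counter]
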